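-- pv_equiv track=rewrite | github.com/GitMonsters/octotetrahedral-agi | re_arc_bench_solves/142a289e.py | transform
-- ===== SOURCE A (Python) =====
-- from collections import Counter
--
-- def transform(grid):
--     rows = len(grid)
--     cols = len(grid[0])
--
--     # Find background (most common color)
--     flat = [c for row in grid for c in row]
--     bg = Counter(flat).most_common(1)[0][0]
--
--     # Find the largest solid rectangle of a single non-background color
--     best_rect = None
--     best_area = 0
--
--     for r1 in range(rows):
--         for c1 in range(cols):
--             if grid[r1][c1] == bg:
--                 continue
--             color = grid[r1][c1]
--             for r2 in range(r1, rows):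
--                 for c2 in range(c1, cols):
--                     # Check if rectangle (r1, c1) to (r2, c2) is solid with 'color'
--                     solid = True
--                     for r in range(r1, r2 + 1):
--                         for c in range(c1, c2 + 1):
--                             if grid[r][c] != color:
--                                 solid = False
--                                 break
--                         if not solid:
--                             break
--                     if solid:
--                         area = (r2 - r1 + 1) * (c2 - c1 + 1)
--                         if area > best_area:
--                             best_area = area
--                             best_rect = (r1, c1, r2, c2, color)
--
--     # Create output: background everywhere, then draw the rectangle
--     output = [[bg] * cols for _ in range(rows)]
--     if best_rect:
--         r1, c1, r2, c2, color = best_rect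
--         for r in range(r1, r2 + 1):
--             for c in range(c1, c2 + 1):
--                 output[r][c] = color
--
--     return output
-- ===== SOURCE B (Python) =====
-- from collections import Counter
--
-- def transform(grid):
--     rows = len(grid)
--     cols = len(grid[0])
--
--     # Find background (most common color)
--     flat = [c for row in grid for c in row]
--     bg = Counter(flat).most_common(1)[0][0]
--
--     best_rect = None
--     best_area = 0
--
--     # For each top-left cell, walk down while the first column keeps the color,
--     # maintaining the minimum right-run length: that is the widest solid
--     # rectangle with this top-left corner and bottom row, the only candidate
--     # of the triple that can ever become the best under a strict '>' update.
--     for r1 in range(rows):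
--         for c1 in range(cols):
--             if grid[r1][c1] == bg:
--                 continue
--             color = grid[r1][c1]
--             w = cols - c1
--             r2 = r1
--             while r2 < rows and grid[r2][c1] == color:
--                 run = 0
--                 while c1 + run < cols and grid[r2][c1 + run] == color:
--                     run += 1
--                 w = min(w, run)
--                 area = (r2 - r1 + 1) * w
--                 if area > best_area:
--                     best_area = area
--                     best_rect = (r1, c1, r2, c1 + w - 1, color)
--                 r2 += 1
--
--     # Create output: background everywhere, then draw the rectangle
--     output = [[bg] * cols for _ in range(rows)]
--     if best_rect:
--         r1, c1, r2, c2, color = best_rect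
--         for r in range(r1, r2 + 1):
--             for c in range(c1, c2 + 1):
--                 output[r][c] = color
--
--     return output
-- ===== Notes on version B (the rewrite author's own statement) =====
-- stated objective: faster
-- what changed: Replaced A's enumeration of every (r1,c1,r2,c2) rectangle with an O(rows*cols) per-cell solidity re-check by a per-top-left downward sweep that keeps the running minimum of right-run lengths, emitting only each triple's widest solid rectangle (the only candidate that can win under A's strict '>' first-max rule).
import Mathlib
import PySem

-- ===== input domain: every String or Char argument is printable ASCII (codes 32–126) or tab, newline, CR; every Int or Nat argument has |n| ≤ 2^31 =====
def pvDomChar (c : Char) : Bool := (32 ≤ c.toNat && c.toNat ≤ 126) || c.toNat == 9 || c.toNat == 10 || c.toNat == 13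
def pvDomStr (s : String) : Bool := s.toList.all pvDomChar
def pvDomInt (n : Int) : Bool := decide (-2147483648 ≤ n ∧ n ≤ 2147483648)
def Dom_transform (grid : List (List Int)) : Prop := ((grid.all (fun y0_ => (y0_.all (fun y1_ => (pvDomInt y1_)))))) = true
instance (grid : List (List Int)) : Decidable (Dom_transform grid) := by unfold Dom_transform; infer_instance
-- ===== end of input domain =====

-- B replaces A's O(rows^3·cols^3) enumeration of all solid rectangles by a per-top-left
-- descent keeping a running minimum of right-run lengths (objective: faster).

-- state: (best_rect, best_area)
def PVS : Type := Option (Int × Int × Int × Int × Int) × Int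

-- grid[r][c] (indices from ranges, always in bounds on admitted inputs)
def pvCell (g : List (List Int)) (r c : Int) : Int :=
  PySem.List.pyGetD (PySem.List.pyGetD g r []) c 0

-- 'if area > best_area: best_area = area; best_rect = rect' (shared by both Pythons verbatim)
def pvUpd (s : PVS) (rect : Int × Int × Int × Int × Int) (area : Int) : PVS :=
  if area > s.2 then (some rect, area) else s

-- 'bg = Counter(flat).most_common(1)[0][0]' (identical line in both Pythons)
def pvBg (g : List (List Int)) : Int :=
  ((PySem.List.sorted (PySem.Dict.counter g.flatten).items (fun kv => kv.2) true).headI).1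

-- 'output = [[bg]*cols for _ in range(rows)]; if best_rect: ... output[r][c] = color' (identical tail in both Pythons)
def pvPaint (bg R C : Int) (s : PVS) : List (List Int) :=
  let out := (PySem.List.pyRange 0 R 1).map (fun _ => PySem.List.pyRepeat [bg] C)
  match s.1 with
  | none => out
  | some (r1, c1, r2, c2, color) =>
      (PySem.List.pyRange r1 (r2 + 1) 1).foldl (fun o r =>
        (PySem.List.pyRange c1 (c2 + 1) 1).foldl (fun o c =>
          PySem.List.pySetD o r (PySem.List.pySetD (PySem.List.pyGetD o r []) c color)) o) out

-- ===== PORT A =====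
-- A's solidity check: 'for r in ...: for c in ...: if grid[r][c] != color: solid=False; break'
def pvSolid (g : List (List Int)) (color r1 c1 r2 c2 : Int) : Bool :=
  (PySem.List.pyRange r1 (r2 + 1) 1).all (fun r =>
    (PySem.List.pyRange c1 (c2 + 1) 1).all (fun c => pvCell g r c == color))

-- A's four nested loops over all candidate rectangles
def pvSearchA (g : List (List Int)) (bg R C : Int) : PVS :=
  (PySem.List.pyRange 0 R 1).foldl (fun s r1 =>
    (PySem.List.pyRange 0 C 1).foldl (fun s c1 =>
      if pvCell g r1 c1 == bg then s else
      (PySem.List.pyRange r1 R 1).foldl (fun s r2 =>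
        (PySem.List.pyRange c1 C 1).foldl (fun s c2 =>
          if pvSolid g (pvCell g r1 c1) r1 c1 r2 c2 then
            pvUpd s (r1, c1, r2, c2, pvCell g r1 c1) ((r2 - r1 + 1) * (c2 - c1 + 1))
          else s) s) s) s) (none, 0)

def transform (grid : List (List Int)) : List (List Int) :=
  let R : Int := grid.length
  let C : Int := (PySem.List.pyGetD grid 0 []).length
  let bg := pvBg grid
  pvPaint bg R C (pvSearchA grid bg R C)

-- ===== PORT B =====
-- 'run = 0; while c1 + run < cols and grid[r2][c1+run] == color: run += 1' (fuel = remaining columns)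
def pvRunScan (g : List (List Int)) (color r c : Int) : Nat → Int
  | 0 => 0
  | n + 1 => if pvCell g r c == color then 1 + pvRunScan g color r (c + 1) n else 0

-- B's 'while r2 < rows and grid[r2][c1] == color: ...' (fuel = remaining rows)
def pvDescend (g : List (List Int)) (C r1 c1 color : Int) : Nat → Int → Int → PVS → PVS
  | 0, _, _, s => s
  | n + 1, r2, w, s =>
    if pvCell g r2 c1 == color then
      pvDescend g C r1 c1 color n (r2 + 1)
        (min w (pvRunScan g color r2 c1 (C - c1).toNat))
        (pvUpd s (r1, c1, r2, c1 + min w (pvRunScan g color r2 c1 (C - c1).toNat) - 1, color)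
          ((r2 - r1 + 1) * min w (pvRunScan g color r2 c1 (C - c1).toNat)))
    else s

def pvSearchB (g : List (List Int)) (bg R C : Int) : PVS :=
  (PySem.List.pyRange 0 R 1).foldl (fun s r1 =>
    (PySem.List.pyRange 0 C 1).foldl (fun s c1 =>
      if pvCell g r1 c1 == bg then s
      else pvDescend g C r1 c1 (pvCell g r1 c1) (R - r1).toNat r1 (C - c1) s) s) (none, 0)

def transform_alt (grid : List (List Int)) : List (List Int) :=
  let R : Int := grid.length
  let C : Int := (PySem.List.pyGetD grid 0 []).length
  let bg := pvBg grid
  pvPaint bg R C (pvSearchB grid bg R C)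

-- ===== PRECONDITION & SPEC =====
-- Pre_ excludes grids on which Python A raises: an empty grid / all-empty rows (IndexError on
-- grid[0] resp. most_common(1)[0]) and ragged grids with a row shorter than row 0 (IndexError
-- on grid[r][c]). A returns on every other grid and Pre_ admits all of those.
def Pre_transform (grid : List (List Int)) : Prop :=
  grid.flatten ≠ [] ∧ ∀ row ∈ grid, grid.headI.length ≤ row.length
instance (grid : List (List Int)) : Decidable (Pre_transform grid) := by
  unfold Pre_transform; infer_instance

def pvWitness_transform : List (List Int) := [[1, 0], [0, 0]]

def Spec_transform (grid : List (List Int)) (out : List (List Int)) : Prop := out = transform_alt grid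
instance (grid : List (List Int)) (out : List (List Int)) : Decidable (Spec_transform grid out) := by unfold Spec_transform; infer_instance

-- ===== CLAIM (what is proved, stated in full; the proofs are below) =====
def Claim_equal_transform : Prop := ∀ (grid : List (List Int)), Dom_transform grid → Pre_transform grid → Spec_transform grid (transform grid)

-- ===== LEMMAS AND PROOFS =====

lemma pvUpd_pvUpd (s : PVS) (x y : Int × Int × Int × Int × Int) (a b : Int) (hab : a < b) :
    pvUpd (pvUpd s x a) y b = pvUpd s y b := by
  unfold pvUpd
  split_ifs <;> first | rfl | (exfalso; simp_all; omega)

lemma pvFoldlFixed {α β : Type} (l : List α) (step : β → α → β)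
    (h : ∀ s x, x ∈ l → step s x = s) : ∀ s, l.foldl step s = s := by
  induction l with
  | nil => intro s; rfl
  | cons x t ih =>
      intro s
      rw [List.foldl_cons, h s x (List.mem_cons_self), ih (fun s y hy => h s y (List.mem_cons_of_mem _ hy))]

lemma pvFoldl_upd_inc (f : Int → Int × Int × Int × Int × Int) (A : Int → Int) (b : Int) :
    ∀ (n : Nat) (a : Int), a < b → (b - a).toNat = n + 1 →
    (∀ i j, a ≤ i → i < j → j < b → A i < A j) →
    ∀ s : PVS, (PySem.List.pyRange a b 1).foldl (fun s c => pvUpd s (f c) (A c)) s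
      = pvUpd s (f (b - 1)) (A (b - 1)) := by
  intro n
  induction n with
  | zero =>
      intro a ha hn _ s
      have hb : b = a + 1 := by omega
      subst hb
      rw [PySem.List.pyRange_one_singleton]
      simp
  | succ n ih =>
      intro a ha hn hmono s
      rw [PySem.List.pyRange_one_cons ha, List.foldl_cons]
      have ha1 : a + 1 < b := by omega
      rw [ih (a + 1) ha1 (by omega) (fun i j h1 h2 h3 => hmono i j (by omega) h2 h3)]
      exact pvUpd_pvUpd _ _ _ _ _ (hmono a (b - 1) le_rfl (by omega) (by omega))

lemma pvRunScan_nonneg (g : List (List Int)) (color r : Int) :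
    ∀ (n : Nat) (c : Int), 0 ≤ pvRunScan g color r c n := by
  intro n
  induction n with
  | zero => intro c; simp [pvRunScan]
  | succ n ih =>
      intro c
      simp only [pvRunScan]
      split_ifs
      · have := ih (c + 1); omega
      · omega

lemma lt_pvRunScan_iff (g : List (List Int)) (color r : Int) :
    ∀ (n : Nat) (c j : Int), 0 ≤ j →
    (j < pvRunScan g color r c n ↔
      (j < (n : Int) ∧ ∀ i : Int, 0 ≤ i → i ≤ j → pvCell g r (c + i) = color)) := by
  intro n
  induction n with
  | zero =>
      intro c j hj
      simp only [pvRunScan, Nat.cast_zero]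
      constructor
      · intro h; omega
      · intro ⟨h, _⟩; omega
  | succ n ih =>
      intro c j hj
      simp only [pvRunScan]
      by_cases hc : pvCell g r c = color
      · rw [if_pos (by simpa using hc)]
        by_cases hj0 : j = 0
        · subst hj0
          constructor
          · intro _
            refine ⟨by omega, fun i hi1 hi2 => ?_⟩
            have : i = 0 := by omega
            subst this; simpa using hc
          · intro _
            have := pvRunScan_nonneg g color r n (c + 1)
            omega
        · have h1 : (0:Int) ≤ j - 1 := by omega
          have := ih (c + 1) (j - 1) h1
          constructor
          · intro h
            have hlt : j - 1 < pvRunScan g color r (c + 1) n := by omega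
            obtain ⟨ha, hb⟩ := this.mp hlt
            refine ⟨by omega, fun i hi1 hi2 => ?_⟩
            by_cases hi0 : i = 0
            · subst hi0; simpa using hc
            · have e : c + i = c + 1 + (i - 1) := by ring
              rw [e]
              exact hb (i - 1) (by omega) (by omega)
          · intro ⟨ha, hb⟩
            have hlt : j - 1 < pvRunScan g color r (c + 1) n := by
              refine this.mpr ⟨by omega, fun i hi1 hi2 => ?_⟩
              have e : c + 1 + i = c + (i + 1) := by ring
              rw [e]
              exact hb (i + 1) (by omega) (by omega)
            omega
      · rw [if_neg (by simpa using hc)]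
        constructor
        · intro h; omega
        · intro ⟨_, hb⟩
          exfalso
          have := hb 0 le_rfl hj
          simp at this
          exact hc this

lemma pvSolid_iff (g : List (List Int)) (color r1 c1 r2 c2 : Int) :
    pvSolid g color r1 c1 r2 c2 = true ↔
      ∀ r, r1 ≤ r → r ≤ r2 → ∀ c, c1 ≤ c → c ≤ c2 → pvCell g r c = color := by
  simp only [pvSolid, List.all_eq_true, PySem.List.mem_pyRange_one, beq_iff_eq]
  constructor
  · intro h r h1 h2 c h3 h4
    exact h r ⟨h1, by omega⟩ c ⟨h3, by omega⟩
  · intro h r hr c hc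
    exact h r hr.1 (by omega) c hc.1 (by omega)

lemma pvRowSolid_iff (g : List (List Int)) (color r c1 c2 C : Int)
    (_h0 : 0 ≤ c1) (h1 : c1 ≤ c2) (h2 : c2 < C) :
    (∀ c, c1 ≤ c → c ≤ c2 → pvCell g r c = color) ↔
      c2 - c1 < pvRunScan g color r c1 (C - c1).toNat := by
  rw [lt_pvRunScan_iff g color r (C - c1).toNat c1 (c2 - c1) (by omega)]
  constructor
  · intro h
    refine ⟨by omega, fun i hi1 hi2 => h (c1 + i) (by omega) (by omega)⟩
  · intro ⟨_, h⟩ c hc1 hc2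
    have e : c = c1 + (c - c1) := by ring
    rw [e]
    exact h (c - c1) (by omega) (by omega)

lemma pv_inner_eq (g : List (List Int)) (R C r1 c1 color : Int)
    (hc1 : 0 ≤ c1) (hc1C : c1 < C) :
    ∀ (n : Nat) (r2 w : Int) (s : PVS),
    r1 ≤ r2 →
    n = (R - r2).toNat →
    (∀ r, r1 ≤ r → r < r2 → pvCell g r c1 = color) →
    (∀ j : Int, 0 ≤ j →
      (j < w ↔ (j < C - c1 ∧ ∀ r, r1 ≤ r → r < r2 → j < pvRunScan g color r c1 (C - c1).toNat))) →
    pvDescend g C r1 c1 color n r2 w s =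
      (PySem.List.pyRange r2 R 1).foldl (fun s r2 =>
        (PySem.List.pyRange c1 C 1).foldl (fun s c2 =>
          if pvSolid g color r1 c1 r2 c2 then
            pvUpd s (r1, c1, r2, c2, color) ((r2 - r1 + 1) * (c2 - c1 + 1))
          else s) s) s := by
  intro n
  induction n with
  | zero =>
      intro r2 w s h12 hn _ _
      rw [PySem.List.pyRange_one_eq_nil (show R ≤ r2 by omega)]
      rfl
  | succ n ih =>
      intro r2 w s h12 hn hmatch hinv
      have hr2R : r2 < R := by omega
      by_cases hc : pvCell g r2 c1 = color
      · -- matched row: one candidate (the widest rectangle of this triple), then recurse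
        rw [PySem.List.pyRange_one_cons hr2R, List.foldl_cons]
        simp only [pvDescend, if_pos (show (pvCell g r2 c1 == color) = true by simpa using hc)]
        have hfuel : (0:Int) < ((C - c1).toNat : Int) := by omega
        have hRLpos : 0 < pvRunScan g color r2 c1 (C - c1).toNat := by
          rw [show (0:Int) = 0 from rfl] at *
          refine (lt_pvRunScan_iff g color r2 (C - c1).toNat c1 0 le_rfl).mpr
            ⟨hfuel, fun i hi1 hi2 => ?_⟩
          have : i = 0 := by omega
          subst this; simpa using hc
        have hRLrow : ∀ r, r1 ≤ r → r < r2 → 0 < pvRunScan g color r c1 (C - c1).toNat := by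
          intro r h1 h2
          refine (lt_pvRunScan_iff g color r (C - c1).toNat c1 0 le_rfl).mpr
            ⟨hfuel, fun i hi1 hi2 => ?_⟩
          have : i = 0 := by omega
          subst this; simpa using hmatch r h1 h2
        have hwpos : 0 < w := (hinv 0 le_rfl).mpr ⟨by omega, hRLrow⟩
        have hwle : w ≤ C - c1 := by
          by_contra hcon
          have := ((hinv (C - c1) (by omega)).mp (by omega)).1
          omega
        set RL := pvRunScan g color r2 c1 (C - c1).toNat with hRL
        have hw'pos : 0 < min w RL := lt_min hwpos hRLpos
        have hw'le : min w RL ≤ C - c1 := le_trans (min_le_left _ _) hwle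
        have hsolid : ∀ c2, c1 ≤ c2 → c2 < C →
            (pvSolid g color r1 c1 r2 c2 = true ↔ c2 < c1 + min w RL) := by
          intro c2 hA hB
          rw [pvSolid_iff]
          constructor
          · intro hs
            have hrow : ∀ r, r1 ≤ r → r ≤ r2 → c2 - c1 < pvRunScan g color r c1 (C - c1).toNat :=
              fun r ha hb =>
                (pvRowSolid_iff g color r c1 c2 C hc1 hA hB).mp
                  (fun c hc1' hc2' => hs r ha hb c hc1' hc2')
            have h1 : c2 - c1 < w :=
              (hinv (c2 - c1) (by omega)).mpr ⟨by omega, fun r ha hb => hrow r ha (by omega)⟩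
            have h2 : c2 - c1 < RL := hrow r2 h12 le_rfl
            have := lt_min h1 h2
            omega
          · intro hlt r hra hrb c hca hcb
            have hcw : c2 - c1 < min w RL := by omega
            have hrow : c2 - c1 < pvRunScan g color r c1 (C - c1).toNat := by
              by_cases hr : r < r2
              · exact ((hinv (c2 - c1) (by omega)).mp
                  (lt_of_lt_of_le hcw (min_le_left _ _))).2 r hra hr
              · have he : r = r2 := by omega
                subst he
                exact lt_of_lt_of_le hcw (min_le_right _ _)
            exact (pvRowSolid_iff g color r c1 c2 C hc1 hA hB).mpr hrow c hca hcb
        have hinner : ∀ t : PVS,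
            (PySem.List.pyRange c1 C 1).foldl (fun s c2 =>
              if pvSolid g color r1 c1 r2 c2 then
                pvUpd s (r1, c1, r2, c2, color) ((r2 - r1 + 1) * (c2 - c1 + 1))
              else s) t
            = pvUpd t (r1, c1, r2, c1 + min w RL - 1, color) ((r2 - r1 + 1) * min w RL) := by
          intro t
          rw [PySem.List.pyRange_one_append c1 (c1 + min w RL) C (by omega) (by omega),
            List.foldl_append]
          have e1 : (PySem.List.pyRange c1 (c1 + min w RL) 1).foldl (fun s c2 =>
              if pvSolid g color r1 c1 r2 c2 then
                pvUpd s (r1, c1, r2, c2, color) ((r2 - r1 + 1) * (c2 - c1 + 1))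
              else s) t
              = pvUpd t (r1, c1, r2, c1 + min w RL - 1, color)
                  ((r2 - r1 + 1) * ((c1 + min w RL - 1) - c1 + 1)) := by
            rw [PySem.List.foldl_congr_mem _ _ (fun s c2 =>
              pvUpd s (r1, c1, r2, c2, color) ((r2 - r1 + 1) * (c2 - c1 + 1))) _
              (by
                intro s' c2 hmem
                rw [PySem.List.mem_pyRange_one] at hmem
                rw [if_pos ((hsolid c2 hmem.1 (by omega)).mpr (by omega))])]
            exact pvFoldl_upd_inc (fun c2 => (r1, c1, r2, c2, color))
              (fun c2 => (r2 - r1 + 1) * (c2 - c1 + 1)) (c1 + min w RL)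
              (min w RL - 1).toNat c1 (by omega) (by omega)
              (fun i j h1 h2 h3 => by
                have hpos : (0:Int) < r2 - r1 + 1 := by omega
                exact mul_lt_mul_of_pos_left (by omega) hpos) t
          rw [e1]
          have e : (c1 + min w RL - 1) - c1 + 1 = min w RL := by ring
          rw [e]
          apply pvFoldlFixed
          intro s' c2 hmem
          rw [PySem.List.mem_pyRange_one] at hmem
          rw [if_neg (by
            intro hs
            have := (hsolid c2 (by omega) hmem.2).mp hs
            omega)]
        rw [hinner s]
        refine ih (r2 + 1) (min w RL) _ (by omega) (by omega)
          (fun r ha hb => ?_) (fun j hj => ?_)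
        · by_cases hr : r < r2
          · exact hmatch r ha hr
          · have : r = r2 := by omega
            subst this; exact hc
        · rw [lt_min_iff, hinv j hj]
          constructor
          · intro ⟨⟨ha, hb⟩, hcj⟩
            refine ⟨ha, fun r h1 h2 => ?_⟩
            by_cases hr : r < r2
            · exact hb r h1 hr
            · have : r = r2 := by omega
              subst this; exact hcj
          · intro ⟨ha, hb⟩
            exact ⟨⟨ha, fun r h1 h2 => hb r h1 (by omega)⟩, hb r2 h12 (by omega)⟩
      · -- mismatched row: descend stops; no later triple has any solid rectangle
        simp only [pvDescend, if_neg (show ¬ (pvCell g r2 c1 == color) = true by simpa using hc)]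
        symm
        apply pvFoldlFixed
        intro s' r2' hmem
        rw [PySem.List.mem_pyRange_one] at hmem
        apply pvFoldlFixed
        intro s'' c2 hmem2
        rw [PySem.List.mem_pyRange_one] at hmem2
        rw [if_neg (by
          intro hs
          exact hc ((pvSolid_iff g color r1 c1 r2' c2).mp hs r2 h12 (by omega) c1 le_rfl (by omega)))]

lemma pvSearch_eq (g : List (List Int)) (bg R C : Int) :
    pvSearchB g bg R C = pvSearchA g bg R C := by
  unfold pvSearchA pvSearchB
  refine PySem.List.foldl_congr_mem _ _ _ _ ?_
  intro s r1 hr1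
  rw [PySem.List.mem_pyRange_one] at hr1
  refine PySem.List.foldl_congr_mem _ _ _ _ ?_
  intro s' c1 hc1
  rw [PySem.List.mem_pyRange_one] at hc1
  by_cases hbg : (pvCell g r1 c1 == bg) = true
  · rw [if_pos hbg, if_pos hbg]
  · rw [if_neg hbg, if_neg hbg]
    refine pv_inner_eq g R C r1 c1 (pvCell g r1 c1) hc1.1 hc1.2
      ((R - r1).toNat) r1 (C - c1) s' le_rfl rfl
      (fun r h1 h2 => absurd h1 (by omega))
      (fun j hj => ⟨fun h => ⟨h, fun r h1 h2 => absurd h1 (by omega)⟩, fun h => h.1⟩)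

lemma pv_transform_eq (g : List (List Int)) : transform g = transform_alt g := by
  simp only [transform, transform_alt, pvSearch_eq]

-- ===== VERDICT (by name: the statement is the Claim_ definition above) =====
theorem transform_spec : Claim_equal_transform := by
  intro g _ _
  show transform g = transform_alt g
  exact pv_transform_eq g
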